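-- pv_equiv track=rewrite | github.com/bughht/Flow-Bloch-T1-mapping-cpp | python/GenSeq_SSFP.py | get_twisted_index
-- ===== SOURCE A (Python) =====
-- def get_twisted_index(N):
--     center_idx = N // 2
--     idx_list = [center_idx]
--
--     twist_direction = -1
--     twist_cnt = False
--     twist_step = 1
--
--     for i in range(1, N):
--         next_idx = center_idx + twist_direction * twist_step
--         idx_list.append(next_idx)
--
--         twist_direction *= -1
--         if twist_cnt:
--             twist_step += 1
--         twist_cnt = not twist_cnt
--
--     return idx_list
-- ===== SOURCE B (Python) =====
-- def get_twisted_index(N):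
--     center = N // 2
--     return [center] + [center + (i // 2 if i % 2 == 0 else -((i + 1) // 2))
--                        for i in range(1, N)]
-- ===== Notes on version B (the rewrite author's own statement) =====
-- stated objective: simpler
-- what changed: Replaced the stateful loop (direction sign, step counter, toggle flag) by a per-index closed-form offset from the center, even indices going right and odd indices left, emitted by a comprehension.
import Mathlib
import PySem

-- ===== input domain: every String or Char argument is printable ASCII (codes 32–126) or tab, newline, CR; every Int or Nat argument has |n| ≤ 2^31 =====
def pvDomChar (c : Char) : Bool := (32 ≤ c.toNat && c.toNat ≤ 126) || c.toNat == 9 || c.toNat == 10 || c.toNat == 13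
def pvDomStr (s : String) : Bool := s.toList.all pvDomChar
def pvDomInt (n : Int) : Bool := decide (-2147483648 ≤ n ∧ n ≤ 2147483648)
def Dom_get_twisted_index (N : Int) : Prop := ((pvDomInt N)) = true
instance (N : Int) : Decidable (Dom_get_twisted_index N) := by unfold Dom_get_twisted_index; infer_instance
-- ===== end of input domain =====

-- B replaces A's running state (direction sign, step counter, toggle flag) with a per-index
-- closed-form offset; objective: simpler.

-- ===== PORT A =====
-- one loop iteration of A: append center+dir*step, flip dir, bump step when cnt, toggle cnt
def pvStepA (c : Int) (st : List Int × Int × Bool × Int) (_i : Int) : List Int × Int × Bool × Int :=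
  match st with
  | (lst, dir, cnt, step) =>
    (lst ++ [c + dir * step], dir * (-1), !cnt, if cnt then step + 1 else step)

def get_twisted_index (N : Int) : List Int :=
  let c := PySem.Int.floordiv N 2
  ((PySem.List.pyRange 1 N 1).foldl (pvStepA c) ([c], -1, false, 1)).1

-- ===== PORT B =====
def pvOffB (c : Int) (i : Int) : Int :=
  c + (if PySem.Int.mod i 2 = 0 then PySem.Int.floordiv i 2
       else -(PySem.Int.floordiv (i + 1) 2))

def get_twisted_index_alt (N : Int) : List Int :=
  let c := PySem.Int.floordiv N 2
  c :: (PySem.List.pyRange 1 N 1).map (pvOffB c)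

-- ===== PRECONDITION & SPEC =====
def Spec_get_twisted_index (N : Int) (out : List Int) : Prop := out = get_twisted_index_alt N
instance (N : Int) (out : List Int) : Decidable (Spec_get_twisted_index N out) := by unfold Spec_get_twisted_index; infer_instance

-- ===== CLAIM (what is proved, stated in full; the proofs are below) =====
def Claim_equal_get_twisted_index : Prop := ∀ (N : Int), Dom_get_twisted_index N → Spec_get_twisted_index N (get_twisted_index N)

-- ===== LEMMAS AND PROOFS =====

-- invariant: after processing range(1, 1+n), A's state is B's list plus the closed-form
-- direction/flag/step values
theorem pvInvA (c : Int) (n : Nat) :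
    (PySem.List.pyRange 1 (1 + (n : Int)) 1).foldl (pvStepA c) ([c], -1, false, 1) =
      (c :: (PySem.List.pyRange 1 (1 + (n : Int)) 1).map (pvOffB c),
       (if n % 2 = 0 then -1 else 1),
       decide (n % 2 = 1),
       1 + ((n / 2 : Nat) : Int)) := by
  induction n with
  | zero =>
      rw [show ((1 : Int) + (0 : Nat) = 1) by norm_num,
          PySem.List.pyRange_one_eq_nil (by norm_num)]
      simp
  | succ n ih =>
      have h1 : (1 : Int) ≤ 1 + (n : Int) := by omega
      rw [show ((1 : Int) + ((n + 1 : Nat) : Int) = (1 + (n : Int)) + 1) by push_cast; ring,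
          PySem.List.pyRange_one_succ_right h1, List.foldl_append, ih,
          List.map_append, List.foldl_cons, List.foldl_nil]
      by_cases hp : n % 2 = 0
      · have f1 : (n + 1) % 2 = 1 := by omega
        have f2 : (n + 1) / 2 = n / 2 := by omega
        have f3 : (1 + (n : Int)) % 2 = 1 := by omega
        have f4 : (1 + (n : Int) + 1) / 2 = 1 + ((n / 2 : Nat) : Int) := by omega
        simp [pvStepA, pvOffB, PySem.Int.mod, PySem.Int.floordiv,
              Int.fmod_eq_emod, Int.fdiv_eq_ediv, hp, f1, f2, f3, f4]
      · have hp1 : n % 2 = 1 := by omega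
        have f1 : (n + 1) % 2 = 0 := by omega
        have f2 : ((n + 1) / 2 : Nat) = (n / 2 : Nat) + 1 := by omega
        have f3 : (1 + (n : Int)) % 2 = 0 := by omega
        have f4 : (1 + (n : Int)) / 2 = 1 + ((n / 2 : Nat) : Int) := by omega
        simp [pvStepA, pvOffB, PySem.Int.mod, PySem.Int.floordiv,
              Int.fmod_eq_emod, Int.fdiv_eq_ediv, hp1, f1, f2, f3, f4]
        omega

-- ===== VERDICT (by name: the statement is the Claim_ definition above) =====
theorem get_twisted_index_spec : Claim_equal_get_twisted_index := by
  intro N _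
  unfold Spec_get_twisted_index get_twisted_index get_twisted_index_alt
  by_cases h : N ≤ 1
  · rw [PySem.List.pyRange_one_eq_nil h]
    simp
  · have hn : N = 1 + ((N - 1).toNat : Int) := by omega
    rw [hn]
    simp only [pvInvA]
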